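-- pv_equiv track=rewrite | github.com/FrancescoCaracciolo/ProgettoRetiLogiche23-24 | tb-generator/main.py | sequence_result
-- ===== SOURCE A (Python) =====
-- def sequence_result(sequence: list) -> list:
--     k = len(sequence)
--     last_valid_value = 0
--     confidence = 0
--     if k%2 != 0:
--         return [];
--     result = []
--     for i in range(0, k):
--         if i % 2 == 0:
--             if sequence[i] == 0:
--                 result.append(last_valid_value)
--                 confidence = confidence-1 if confidence > 0 else 0
--             else:
--                 result.append(sequence[i])
--                 last_valid_value = sequence[i]
--                 confidence = 31
--         else:
--             result.append(confidence)
--     return result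
-- ===== SOURCE B (Python) =====
-- def sequence_result(sequence: list) -> list:
--     if len(sequence) % 2 != 0:
--         return []
--     evens = sequence[::2]
--     # pass 1: for each even-slot position, the index of the most recent
--     # nonzero even-slot value at or before it (-1 if none yet)
--     anchors = []
--     a = -1
--     for j, v in enumerate(evens):
--         if v != 0:
--             a = j
--         anchors.append(a)
--     # pass 2: closed form — the value at the anchor, and confidence
--     # max(0, 31 - distance from the anchor); no decrementing counter
--     out = []
--     for j, a in enumerate(anchors):
--         if a < 0:
--             out += [0, 0]
--         else:
--             c = 31 - (j - a)
--             out += [evens[a], c if c > 0 else 0]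
--     return out
-- ===== Notes on version B (the rewrite author's own statement) =====
-- stated objective: alternative
-- what changed: B replaces A's single-pass state machine (last_valid_value + decrementing confidence counter with an i%2 branch) by two staged passes over the even slots: first compute for each position the index of the most recent nonzero value, then emit each output pair by the closed form (value at anchor, max(0, 31 - distance to anchor)); no confidence counter exists in B.
import Mathlib
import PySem

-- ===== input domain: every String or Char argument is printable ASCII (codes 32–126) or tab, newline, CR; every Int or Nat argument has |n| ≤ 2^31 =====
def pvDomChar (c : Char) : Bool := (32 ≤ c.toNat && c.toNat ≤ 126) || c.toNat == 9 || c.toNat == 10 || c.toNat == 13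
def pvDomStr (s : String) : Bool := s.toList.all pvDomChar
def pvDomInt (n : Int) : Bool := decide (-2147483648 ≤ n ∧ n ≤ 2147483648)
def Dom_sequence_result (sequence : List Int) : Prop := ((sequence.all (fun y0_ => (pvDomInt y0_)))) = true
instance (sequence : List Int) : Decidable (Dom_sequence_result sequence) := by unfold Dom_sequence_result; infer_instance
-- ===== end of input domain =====

-- B replaces A's one-pass state machine (decrementing confidence counter, i%2 branch)
-- by two staged passes over the even slots: anchor indices of the last nonzero value,
-- then a closed-form emission max(0, 31 - distance); objective: alternative.

-- ===== PORT A =====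
-- A's loop body: state is (result, last_valid_value, confidence); i runs over range(0, k).
def pvStepA (sequence : List Int) (st : List Int × Int × Int) (i : Int) : List Int × Int × Int :=
  let result := st.1
  let last_valid_value := st.2.1
  let confidence := st.2.2
  if PySem.Int.mod i 2 == 0 then
    if PySem.List.pyGetD sequence i 0 == 0 then
      (result ++ [last_valid_value], last_valid_value,
        if confidence > 0 then confidence - 1 else 0)
    else
      (result ++ [PySem.List.pyGetD sequence i 0], PySem.List.pyGetD sequence i 0, 31)
  else
    (result ++ [confidence], last_valid_value, confidence)

def sequence_result (sequence : List Int) : List Int :=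
  let k := sequence.length
  if k % 2 ≠ 0 then []
  else ((PySem.List.pyRange 0 k 1).foldl (pvStepA sequence) ([], 0, 0)).1

-- ===== PORT B =====
-- pass 1 of Source B: for j, v in enumerate(evens): if v != 0: a = j; anchors.append(a)
def pvAnchors : List Int → Int → Int → List Int
  | [], _, _ => []
  | v :: rest, j, a =>
      let a' := if v ≠ 0 then j else a
      a' :: pvAnchors rest (j + 1) a'

-- pass 2 of Source B: for j, a in enumerate(anchors): out += [0,0] or [evens[a], max-form]
def pvEmit (evens : List Int) : Int → List Int → List Int
  | _, [] => []
  | j, a :: rest =>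
      (if a < 0 then [0, 0]
       else [PySem.List.pyGetD evens a 0,
             if 31 - (j - a) > 0 then 31 - (j - a) else 0]) ++ pvEmit evens (j + 1) rest

def sequence_result_alt (sequence : List Int) : List Int :=
  if sequence.length % 2 ≠ 0 then []
  else
    let evens := (PySem.List.slice? sequence none none 2).getD []     -- sequence[::2]
    pvEmit evens 0 (pvAnchors evens 0 (-1))

-- ===== PRECONDITION & SPEC =====
def Spec_sequence_result (sequence : List Int) (out : List Int) : Prop := out = sequence_result_alt sequence
instance (sequence : List Int) (out : List Int) : Decidable (Spec_sequence_result sequence out) := by unfold Spec_sequence_result; infer_instance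

-- ===== CLAIM (what is proved, stated in full; the proofs are below) =====
def Claim_equal_sequence_result : Prop := ∀ (sequence : List Int), Dom_sequence_result sequence → Spec_sequence_result sequence (sequence_result sequence)

-- ===== LEMMAS AND PROOFS =====

-- proof intermediary: the pairwise recursion both ports are related to
def pvPairLoop : List Int → Int → Int → List Int
  | v :: _ :: rest, last_valid_value, confidence =>
    if v == 0 then
      let confidence' := if confidence > 0 then confidence - 1 else 0
      last_valid_value :: confidence' :: pvPairLoop rest last_valid_value confidence'
    else
      v :: (31 : Int) :: pvPairLoop rest v 31
  | _, _, _ => []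

-- proof intermediary: the even-indexed slots of an even-length list
def pvEv2 : List Int → List Int
  | v :: _ :: rest => v :: pvEv2 rest
  | _ => []

theorem pvKey (rest : List Int) : ∀ (pre acc : List Int) (lvv conf : Int),
    pre.length % 2 = 0 → rest.length % 2 = 0 →
    ((PySem.List.pyRange pre.length (pre.length + rest.length) 1).foldl
        (pvStepA (pre ++ rest)) (acc, lvv, conf)).1
      = acc ++ pvPairLoop rest lvv conf := by
  match rest with
  | [] =>
    intro pre acc lvv conf h1 h2
    simp [PySem.List.pyRange_one_eq_nil, pvPairLoop]
  | [x] =>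
    intro pre acc lvv conf h1 h2
    simp at h2
  | x :: y :: rest' =>
    intro pre acc lvv conf h1 h2
    have h2' : rest'.length % 2 = 0 := by
      simp only [List.length_cons] at h2; omega
    have hb : (pre.length : Int) + (x :: y :: rest').length = (pre ++ [x, y]).length + rest'.length := by
      simp only [List.length_cons, List.length_append, List.length_nil]; push_cast; omega
    rw [PySem.List.pyRange_one_cons (by simp only [List.length_cons]; push_cast; omega)]
    rw [PySem.List.pyRange_one_cons (by simp only [List.length_cons]; push_cast; omega)]
    simp only [List.foldl_cons]
    have hmod0 : PySem.Int.mod (pre.length : Int) 2 = 0 := by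
      rw [PySem.Int.mod_eq_emod_of_pos (by norm_num)]; omega
    have hmod1 : PySem.Int.mod ((pre.length : Int) + 1) 2 = 1 := by
      rw [PySem.Int.mod_eq_emod_of_pos (by norm_num)]; omega
    have hx : PySem.List.pyGetD (pre ++ x :: y :: rest') (pre.length : Int) 0 = x := by
      simp [List.getD_eq_getElem?_getD]
    have hrw : (pre.length : Int) + 1 + 1 = ((pre ++ [x, y]).length : Int) := by
      simp only [List.length_append, List.length_cons, List.length_nil]; push_cast; ring
    have hlist : pre ++ x :: y :: rest' = (pre ++ [x, y]) ++ rest' := by simp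
    have hIH := pvKey rest'
    by_cases hx0 : x = 0
    · have step1 : pvStepA (pre ++ x :: y :: rest') (acc, lvv, conf) (pre.length : Int)
          = (acc ++ [lvv], lvv, if conf > 0 then conf - 1 else 0) := by
        simp only [pvStepA]; rw [hmod0, hx]; simp [hx0]
      rw [step1]
      have step2 : pvStepA (pre ++ x :: y :: rest')
          (acc ++ [lvv], lvv, if conf > 0 then conf - 1 else 0) ((pre.length : Int) + 1)
          = (acc ++ [lvv] ++ [if conf > 0 then conf - 1 else 0], lvv,
              if conf > 0 then conf - 1 else 0) := by
        simp only [pvStepA]; rw [hmod1]; simp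
      rw [step2, hb, hrw, hlist]
      rw [hIH (pre ++ [x, y]) _ _ _ (by simp only [List.length_append, List.length_cons, List.length_nil]; omega) h2']
      simp [pvPairLoop, hx0]
    · have step1 : pvStepA (pre ++ x :: y :: rest') (acc, lvv, conf) (pre.length : Int)
          = (acc ++ [x], x, 31) := by
        simp only [pvStepA]; rw [hmod0, hx]; simp [hx0]
      rw [step1]
      have step2 : pvStepA (pre ++ x :: y :: rest') (acc ++ [x], x, 31) ((pre.length : Int) + 1)
          = (acc ++ [x] ++ [(31 : Int)], x, 31) := by
        simp only [pvStepA]; rw [hmod1]; simp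
      rw [step2, hb, hrw, hlist]
      rw [hIH (pre ++ [x, y]) _ _ _ (by simp only [List.length_append, List.length_cons, List.length_nil]; omega) h2']
      simp [pvPairLoop, hx0]
termination_by rest.length

theorem pvSl2 (v w : Int) (rest : List Int) (h : rest.length % 2 = 0) :
    PySem.List.slice? (v :: w :: rest) none none 2
      = some (v :: (PySem.List.slice? rest none none 2).getD []) := by
  simp [PySem.List.slice?, PySem.List.sliceIndices]
  rw [if_pos (show (0:Int) ≤ (rest.length : Int) + 1 by positivity)]
  have e1 : (((rest.length : Int) + 1 + 1 + 2 - 1) / 2).toNat = rest.length / 2 + 1 := by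
    omega
  rw [e1]
  rcases Nat.eq_zero_or_pos rest.length with h0 | hpos
  · have : rest = [] := List.length_eq_zero_iff.mp h0
    subst this
    simp [List.range_succ]
  · rw [if_pos hpos]
    have e2 : (((rest.length : Int) + 2 - 1) / 2).toNat = rest.length / 2 := by omega
    rw [e2, List.range_succ_eq_map, List.filterMap_cons]
    have hf0 : ((2 : Int) * ((0 : Nat) : Int)).toNat = 0 := by omega
    simp only [hf0, List.getElem?_cons_zero, List.filterMap_map]
    congr 1

theorem pvEvEq (s : List Int) : s.length % 2 = 0 →
    (PySem.List.slice? s none none 2).getD [] = pvEv2 s := by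
  match s with
  | [] => intro _; simp [PySem.List.slice?, pvEv2]
  | [x] => intro h; simp at h
  | v :: w :: rest =>
    intro h
    have h' : rest.length % 2 = 0 := by simp only [List.length_cons] at h; omega
    rw [pvSl2 v w rest h']
    simp only [Option.getD_some, pvEv2]
    rw [pvEvEq rest h']
termination_by s.length

theorem pvMain (rest : List Int) : ∀ (ev pre : List Int) (a lvv conf : Int),
    ev = pre ++ pvEv2 rest → rest.length % 2 = 0 →
    (a < 0 → lvv = 0 ∧ conf = 0) →
    (0 ≤ a → a < (pre.length : Int) ∧ PySem.List.pyGetD ev a 0 = lvv ∧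
        conf = max 0 (31 - ((pre.length : Int) - 1 - a))) →
    pvPairLoop rest lvv conf
      = pvEmit ev (pre.length : Int) (pvAnchors (pvEv2 rest) (pre.length : Int) a) := by
  match rest with
  | [] => intro ev pre a lvv conf _ _ _ _; simp [pvPairLoop, pvEv2, pvAnchors, pvEmit]
  | [x] => intro ev pre a lvv conf _ h2 _ _; simp at h2
  | v :: w :: rest' =>
    intro ev pre a lvv conf hev hlen h1 h2
    have hlen' : rest'.length % 2 = 0 := by simp only [List.length_cons] at hlen; omega
    have hevv : ev = (pre ++ [v]) ++ pvEv2 rest' := by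
      rw [hev]; simp [pvEv2]
    have hgetj : PySem.List.pyGetD ev (pre.length : Int) 0 = v := by
      rw [hev]; simp only [pvEv2]
      simp [List.getD_eq_getElem?_getD]
    have hlenpre : (((pre ++ [v]).length : Int)) = (pre.length : Int) + 1 := by
      simp
    simp only [pvEv2, pvAnchors]
    by_cases hv : v = 0
    · subst hv
      simp only [ne_eq, not_true_eq_false, if_false]
      have hstep : pvPairLoop (0 :: w :: rest') lvv conf
          = lvv :: (if conf > 0 then conf - 1 else 0)
              :: pvPairLoop rest' lvv (if conf > 0 then conf - 1 else 0) := by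
        simp [pvPairLoop]
      rw [hstep]
      by_cases ha : a < 0
      · obtain ⟨hl, hc⟩ := h1 ha
        have hIH := pvMain rest' ev (pre ++ [0]) a lvv
            (if conf > 0 then conf - 1 else 0) hevv hlen'
            (fun _ => ⟨hl, by split_ifs <;> omega⟩)
            (fun h0 => absurd h0 (by omega))
        simp only [pvEmit, if_pos ha]
        rw [hIH, hlenpre]
        simp [hl, hc]
      · rw [not_lt] at ha
        obtain ⟨hlt, hget, hc⟩ := h2 ha
        have hIH := pvMain rest' ev (pre ++ [0]) a lvv
            (if conf > 0 then conf - 1 else 0) hevv hlen'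
            (fun h0 => absurd h0 (by omega))
            (fun _ => ⟨by rw [hlenpre]; omega, hget,
              by rw [hlenpre]; split_ifs <;> omega⟩)
        simp only [pvEmit, if_neg (show ¬ a < 0 by omega)]
        rw [hIH, hlenpre, hget]
        have hemit : (if 31 - ((pre.length : Int) - a) > 0
              then 31 - ((pre.length : Int) - a) else 0)
            = (if conf > 0 then conf - 1 else 0) := by split_ifs <;> omega
        rw [hemit]
        simp
    · simp only [ne_eq, hv, not_false_eq_true, if_true]
      have hstep : pvPairLoop (v :: w :: rest') lvv conf
          = v :: 31 :: pvPairLoop rest' v 31 := by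
        simp [pvPairLoop, hv]
      rw [hstep]
      have hIH := pvMain rest' ev (pre ++ [v]) (pre.length : Int) v 31
          hevv hlen'
          (fun h0 => absurd h0 (by omega))
          (fun _ => ⟨by rw [hlenpre]; omega, hgetj, by rw [hlenpre]; omega⟩)
      simp only [pvEmit, if_neg (show ¬ ((pre.length : Int) < 0) by omega)]
      rw [hIH, hlenpre, hgetj]
      norm_num
termination_by rest.length

-- ===== VERDICT =====
theorem sequence_result_spec : Claim_equal_sequence_result := by
  intro s _
  unfold Spec_sequence_result sequence_result sequence_result_alt
  by_cases h : s.length % 2 = 0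
  · simp only [h, ne_eq, not_true_eq_false, if_false]
    have hA : ((PySem.List.pyRange 0 s.length 1).foldl (pvStepA s) ([], 0, 0)).1
        = pvPairLoop s 0 0 := by
      simpa using pvKey s [] [] 0 0 (by simp) h
    have hB := pvMain s (pvEv2 s) [] (-1) 0 0 (by simp) h
        (fun _ => ⟨rfl, rfl⟩) (fun h0 => absurd h0 (by omega))
    rw [pvEvEq s h]
    simp only [List.length_nil, Nat.cast_zero] at hB
    rw [hA, hB]
  · simp [h]
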